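-- pv_equiv track=rewrite | github.com/kimwoo123/PS | 프로그래머스/2/340212. ［PCCP 기출문제］ 2번 ／ 퍼즐 게임 챌린지/［PCCP 기출문제］ 2번 ／ 퍼즐 게임 챌린지.py | solution
-- ===== SOURCE A (Python) =====
-- def calculate(diffs, times, level, n, limit):
--     total = 0
--     before = 0
--     for i in range(n):
--         diff, time = diffs[i], times[i]
--         if diff <= level:
--             total += time
--         else:
--             total += (diff - level) * (time + before) + time
--
--         before = time
--         if total > limit:
--             return False
--
--     return True
--
-- def solution(diffs, times, limit):
--     answer = 300_000
--     n = len(diffs)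
--
--     left = 0
--     right = 300_000
--     while left < right - 1:
--         mid = (left + right) // 2
--         if calculate(diffs, times, mid, n, limit):
--             answer = mid
--             right = mid
--         else:
--             left = mid
--
--     return answer
-- ===== SOURCE B (Python) =====
-- def solution(diffs, times, limit):
--     # Linear scan for the smallest feasible level instead of binary search.
--     for lvl in range(1, 300000):
--         total = 0
--         before = 0
--         ok = True
--         for d, t in zip(diffs, times):
--             total += t if d <= lvl else (d - lvl) * (t + before) + t
--             before = t
--             if total > limit:
--                 ok = False
--                 break
--         if ok:
--             return lvl
--     return 300000
-- ===== Notes on version B (the rewrite author's own statement) =====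
-- stated objective: simpler
-- what changed: Replaces the binary search over levels by a plain linear scan that returns the first level in [1,300000) whose cost fits the limit (falling back to 300000), reusing the same per-level cost loop; equivalent because the cost is monotone when times are nonnegative.
-- outside the precondition, e.g. on solution([10], [-1], -5): A returns 300000, B returns 1; on solution([5, 5], [10], 0): A returns 300000, B returns 300000
import Mathlib
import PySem

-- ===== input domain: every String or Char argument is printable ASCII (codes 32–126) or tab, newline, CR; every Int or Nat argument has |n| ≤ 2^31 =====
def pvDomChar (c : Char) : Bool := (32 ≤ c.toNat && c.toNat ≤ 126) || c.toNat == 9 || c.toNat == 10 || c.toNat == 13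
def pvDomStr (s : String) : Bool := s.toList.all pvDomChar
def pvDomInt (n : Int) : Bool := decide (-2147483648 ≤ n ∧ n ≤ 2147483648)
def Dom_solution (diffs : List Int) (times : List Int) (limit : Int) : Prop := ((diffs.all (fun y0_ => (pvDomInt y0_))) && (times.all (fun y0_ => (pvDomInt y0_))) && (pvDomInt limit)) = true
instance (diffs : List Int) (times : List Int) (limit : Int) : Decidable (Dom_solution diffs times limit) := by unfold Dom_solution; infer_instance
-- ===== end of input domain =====

-- B replaces A's binary search over levels by a linear scan that returns the first feasible
-- level (same per-level cost loop); simpler, not faster.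


-- ===== PORT A =====
-- A's `calculate`: loop over i in range(len(diffs)) reading diffs[i], times[i], ported as joint
-- structural recursion on the two lists (on Pre_ len(times) ≥ len(diffs), so the catch-all —
-- where Python would raise IndexError — is never reached inside Pre_).
def pvCalcA (diffs times : List Int) (level limit total before : Int) : Bool :=
  match diffs, times with
  | d :: ds, t :: ts =>
    let total' := total + (if d ≤ level then t else (d - level) * (t + before) + t)
    if total' > limit then false
    else pvCalcA ds ts level limit total' t
  | _, _ => true

-- A's while-loop over (answer, left, right), ported with a Nat iteration counter: the gap
-- right - left starts at 300000 and strictly decreases every iteration, so with fuel 300000 the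
-- loop always exits via its own condition `left < right - 1` and the fuel is never exhausted.
def pvBsLoop (diffs times : List Int) (limit : Int) : Nat → Int → Int → Int → Int
  | 0, answer, _, _ => answer
  | n + 1, answer, left, right =>
    if left < right - 1 then
      let mid := PySem.Int.floordiv (left + right) 2
      if pvCalcA diffs times mid limit 0 0 then pvBsLoop diffs times limit n mid left mid
      else pvBsLoop diffs times limit n answer mid right
    else answer

def solution (diffs : List Int) (times : List Int) (limit : Int) : Int :=
  pvBsLoop diffs times limit 300000 300000 0 300000

-- ===== PORT B =====
-- B's inner cost loop: `for d, t in zip(diffs, times)` with break on total > limit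
def pvCostB (level limit : Int) (pairs : List (Int × Int)) (total before : Int) : Bool :=
  match pairs with
  | [] => true
  | (d, t) :: rest =>
    let total' := total + (if d ≤ level then t else (d - level) * (t + before) + t)
    if total' > limit then false
    else pvCostB level limit rest total' t

-- B's `for lvl in range(1, 300000)` scan: 299999 iterations, fall back to 300000 when exhausted
def pvScan (diffs times : List Int) (limit : Int) : Nat → Int → Int
  | 0, _ => 300000
  | n + 1, lvl =>
    if pvCostB lvl limit (diffs.zip times) 0 0 then lvl
    else pvScan diffs times limit n (lvl + 1)

def solution_alt (diffs : List Int) (times : List Int) (limit : Int) : Int :=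
  pvScan diffs times limit 299999 1

-- ===== PRECONDITION & SPEC =====
-- Pre_ excludes (a) inputs with len(times) < len(diffs), on which Python A raises IndexError for
-- almost every input (the rest return only via an accidental early exit), and (b) inputs with a
-- negative solve time, outside the puzzle domain, where A's binary search over a then non-monotone
-- feasibility predicate returns an accidental value.
def Pre_solution (diffs : List Int) (times : List Int) (limit : Int) : Prop :=
  diffs.length ≤ times.length ∧ ∀ t ∈ times, 0 ≤ t
instance (diffs : List Int) (times : List Int) (limit : Int) : Decidable (Pre_solution diffs times limit) := by unfold Pre_solution; infer_instance

def pvWitness_solution : List Int × List Int × Int := ([2, 5], [1, 3], 30)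

def Spec_solution (diffs : List Int) (times : List Int) (limit : Int) (out : Int) : Prop := out = solution_alt diffs times limit
instance (diffs : List Int) (times : List Int) (limit : Int) (out : Int) : Decidable (Spec_solution diffs times limit out) := by unfold Spec_solution; infer_instance

-- ===== CLAIM (what is proved, stated in full; the proofs are below) =====
def Claim_equal_solution : Prop := ∀ (diffs : List Int) (times : List Int) (limit : Int), Dom_solution diffs times limit → Pre_solution diffs times limit → Spec_solution diffs times limit (solution diffs times limit)

-- ===== LEMMAS AND PROOFS =====

-- the two cost loops compute the same boolean
theorem calcA_eq_costB (diffs times : List Int) (level limit total before : Int) :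
    pvCalcA diffs times level limit total before
      = pvCostB level limit (diffs.zip times) total before := by
  induction diffs generalizing times total before with
  | nil => cases times <;> simp [pvCalcA, pvCostB]
  | cons d ds ih =>
    cases times with
    | nil => simp [pvCalcA, pvCostB]
    | cons t ts =>
      simp only [pvCalcA, List.zip_cons_cons, pvCostB]
      split_ifs <;> simp [ih]

-- one step of the cost is antitone in the level (times and before nonnegative)
theorem term_antitone (d t l1 l2 b : Int) (ht : 0 ≤ t) (hb : 0 ≤ b) (hl : l1 ≤ l2) :
    (if d ≤ l2 then t else (d - l2) * (t + b) + t)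
      ≤ (if d ≤ l1 then t else (d - l1) * (t + b) + t) := by
  split_ifs with h1 h2 <;> nlinarith

-- feasibility is monotone in the level when all times are nonnegative
theorem calcA_mono (l1 l2 limit : Int) (hl : l1 ≤ l2) :
    ∀ (diffs times : List Int) (t1 t2 b : Int), (∀ t ∈ times, 0 ≤ t) → 0 ≤ b → t2 ≤ t1 →
      pvCalcA diffs times l1 limit t1 b = true → pvCalcA diffs times l2 limit t2 b = true := by
  intro diffs
  induction diffs with
  | nil => intro times t1 t2 b _ _ _ _; simp [pvCalcA]
  | cons d ds ih =>
    intro times t1 t2 b hts hb ht12 h1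
    cases times with
    | nil => simp [pvCalcA]
    | cons t ts =>
      have ht : 0 ≤ t := hts t (by simp)
      simp only [pvCalcA] at h1 ⊢
      have hterm := term_antitone d t l1 l2 b ht hb hl
      by_cases hgt : t1 + (if d ≤ l1 then t else (d - l1) * (t + b) + t) > limit
      · simp [hgt] at h1
      · simp only [if_neg hgt] at h1
        have hle2 : ¬ (t2 + (if d ≤ l2 then t else (d - l2) * (t + b) + t) > limit) := by omega
        simp only [if_neg hle2]
        exact ih ts _ _ t (fun x hx => hts x (by simp [hx])) ht (by omega) h1

-- skipping infeasible levels: the scan from lvl equals the scan from r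
theorem scan_congr (diffs times : List Int) (limit : Int) :
    ∀ (n : Nat) (lvl r : Int), (r - lvl).toNat = n → lvl ≤ r → r ≤ 300000 →
      (∀ k, lvl ≤ k → k < r → pvCostB k limit (diffs.zip times) 0 0 = false) →
      pvScan diffs times limit (300000 - lvl).toNat lvl
        = pvScan diffs times limit (300000 - r).toNat r := by
  intro n
  induction n with
  | zero =>
    intro lvl r h hle _ _
    have : lvl = r := by omega
    rw [this]
  | succ n ih =>
    intro lvl r h hle hr hall
    have hlt : lvl < r := by omega
    have hfuel : (300000 - lvl).toNat = (300000 - (lvl + 1)).toNat + 1 := by omega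
    rw [hfuel, pvScan]
    simp only [hall lvl le_rfl hlt, Bool.false_eq_true, if_false]
    exact ih (lvl + 1) r (by omega) (by omega) hr (fun k hk1 hk2 => hall k (by omega) hk2)

-- the binary-search loop, under its invariant, returns the first feasible level
theorem bs_eq_scan (diffs times : List Int) (limit : Int)
    (hmono : ∀ l1 l2, l1 ≤ l2 → pvCalcA diffs times l1 limit 0 0 = true →
        pvCalcA diffs times l2 limit 0 0 = true) :
    ∀ (n : Nat) (a l r : Int), (r - l).toNat ≤ n → 0 ≤ l → l < r → r ≤ 300000 →
      (l = 0 ∨ pvCalcA diffs times l limit 0 0 = false) →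
      (r = 300000 ∨ pvCalcA diffs times r limit 0 0 = true) →
      a = (if r = 300000 then (300000 : Int) else r) →
      pvBsLoop diffs times limit n a l r = pvScan diffs times limit 299999 1 := by
  intro n
  induction n with
  | zero => intro a l r hn h0 hlr _ _ _ _; omega
  | succ n ih =>
    intro a l r hn h0 hlr hr300 hleft hright ha
    rw [pvBsLoop]
    by_cases hlt : l < r - 1
    · have hm : PySem.Int.floordiv (l + r) 2 = (l + r) / 2 :=
        PySem.Int.floordiv_eq_ediv_of_pos (by norm_num)
      have hmid1 : l < PySem.Int.floordiv (l + r) 2 := by rw [hm]; omega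
      have hmid2 : PySem.Int.floordiv (l + r) 2 < r := by rw [hm]; omega
      simp only [if_pos hlt]
      by_cases hf : pvCalcA diffs times (PySem.Int.floordiv (l + r) 2) limit 0 0 = true
      · simp only [hf, if_true]
        exact ih _ _ _ (by omega) h0 hmid1 (by omega) hleft (Or.inr hf)
          (by rw [if_neg (by omega)])
      · simp only [hf]
        exact ih _ _ _ (by omega) (by omega) hmid2 hr300 (Or.inr (by simpa using hf))
          hright ha
    · simp only [if_neg hlt]
      have hlr1 : l = r - 1 := by omega
      have hstart : (299999 : Nat) = (300000 - (1 : Int)).toNat := by omega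
      by_cases h300 : r = 300000
      · -- answer is 300000; l = 299999 is infeasible, hence every level below 300000 is
        have hfl : pvCalcA diffs times l limit 0 0 = false := by
          rcases hleft with h | h
          · omega
          · exact h
        have hall : ∀ k, (1 : Int) ≤ k → k < 300000 →
            pvCostB k limit (diffs.zip times) 0 0 = false := by
          intro k hk1 hk2
          rw [← calcA_eq_costB]
          cases hc : pvCalcA diffs times k limit 0 0
          · rfl
          · have := hmono k l (by omega) hc
            rw [hfl] at this
            exact absurd this (by simp)
        rw [ha, if_pos h300, hstart,
          scan_congr diffs times limit 299999 1 300000 (by omega) (by omega) (by omega)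
            (fun k hk1 hk2 => hall k hk1 hk2)]
        have : ((300000 : Int) - 300000).toNat = 0 := by omega
        rw [this, pvScan]
      · -- r < 300000 and feas r holds: answer is r, the first feasible level
        have hfr : pvCalcA diffs times r limit 0 0 = true := by
          rcases hright with h | h
          · exact absurd h h300
          · exact h
        have hall : ∀ k, (1 : Int) ≤ k → k < r →
            pvCostB k limit (diffs.zip times) 0 0 = false := by
          intro k hk1 hk2
          rcases hleft with h0' | hfl
          · omega
          · rw [← calcA_eq_costB]
            cases hc : pvCalcA diffs times k limit 0 0
            · rfl
            · have := hmono k l (by omega) hc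
              rw [hfl] at this
              exact absurd this (by simp)
        rw [ha, if_neg h300, hstart,
          scan_congr diffs times limit (r - 1).toNat 1 r (by omega) (by omega) (by omega)
            (fun k hk1 hk2 => hall k hk1 hk2)]
        have hfuel : (300000 - r).toNat = (300000 - (r + 1)).toNat + 1 := by omega
        rw [hfuel, pvScan]
        have hc : pvCostB r limit (diffs.zip times) 0 0 = true := by
          rw [← calcA_eq_costB]; exact hfr
        simp [hc]

-- ===== VERDICT (by name: the statement is the Claim_ definition above) =====
theorem solution_spec : Claim_equal_solution := by
  intro diffs times limit _hdom hpre
  unfold Spec_solution solution solution_alt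
  exact bs_eq_scan diffs times limit
    (fun l1 l2 h h1 => calcA_mono l1 l2 limit h diffs times 0 0 0 hpre.2 le_rfl le_rfl h1)
    300000 300000 0 300000 (by omega) (by omega) (by omega) (by omega)
    (Or.inl rfl) (Or.inl rfl) (by norm_num)
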